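-- pv_equiv track=rewrite | github.com/sergeylobachev/leetcode | Problems/486.py | solution
-- ===== SOURCE A (Python) =====
-- def solution(l, nums, advantage):
--     if l == "a":
--         if len(nums) == 0 and advantage >= 0:
--             return True
--         elif len(nums) == 0 and advantage < 0:
--             return False
--         else:
--             return not solution("b", nums[1:], (advantage + nums[0]) * -1) or not solution("b", nums[:-1], (advantage + nums[-1]) * -1)
--     if l == "b":
--         if len(nums) == 0 and advantage > 0:
--             return True
--         elif len(nums) == 0 and advantage <= 0:
--             return False
--         else:
--             return not solution("a", nums[1:], (advantage + nums[0]) * -1) or not solution("a", nums[:-1], (advantage + nums[-1]) * -1)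
-- ===== SOURCE B (Python) =====
-- def solution(l, nums, advantage):
--     # forced score difference via bottom-up interval DP over diagonals
--     n = len(nums)
--     d = list(nums)
--     for L in range(2, n + 1):
--         d = [max(nums[i] - d[i + 1], nums[i + L - 1] - d[i]) for i in range(n - L + 1)]
--     diff = d[0] if n > 0 else 0
--     if l == "a":
--         return advantage + diff >= 0
--     if l == "b":
--         return advantage + diff > 0
-- ===== Notes on version B (the rewrite author's own statement) =====
-- stated objective: alternative
-- what changed: Replaces the exponential-worst-case two-player win/lose game recursion with a bottom-up O(n^2) interval DP computing the mover's forced score difference, then a single comparison against the accumulated advantage.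
import Mathlib
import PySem

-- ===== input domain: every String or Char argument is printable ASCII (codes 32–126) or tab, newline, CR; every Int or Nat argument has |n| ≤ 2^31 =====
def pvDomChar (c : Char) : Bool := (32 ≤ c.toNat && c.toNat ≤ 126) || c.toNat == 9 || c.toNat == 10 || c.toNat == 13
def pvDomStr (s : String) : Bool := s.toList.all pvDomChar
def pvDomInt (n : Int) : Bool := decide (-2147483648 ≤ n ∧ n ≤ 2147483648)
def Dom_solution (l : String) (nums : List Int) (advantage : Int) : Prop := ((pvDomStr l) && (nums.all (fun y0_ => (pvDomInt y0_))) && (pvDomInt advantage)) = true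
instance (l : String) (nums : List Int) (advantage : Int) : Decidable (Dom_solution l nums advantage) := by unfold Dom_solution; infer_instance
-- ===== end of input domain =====

-- B replaces A's game recursion (exponential in the worst case) by a bottom-up interval DP
-- over forced score differences (objective: alternative algorithm; not measured faster).


-- ===== PORT A =====
-- nums[0] / nums[-1] are ported as pyGetD with default 0: exact here, since both reads are
-- guarded by len(nums) ≠ 0; nums[1:] / nums[:-1] via PySem.List.slice (exact).
def solution (l : String) (nums : List Int) (advantage : Int) : Bool :=
  if l = "a" then
    if h1 : nums.length = 0 ∧ advantage ≥ 0 then true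
    else if h2 : nums.length = 0 ∧ advantage < 0 then false
    else
      !(solution "b" (PySem.List.slice nums (some 1) none) ((advantage + PySem.List.pyGetD nums 0 0) * -1)) ||
      !(solution "b" (PySem.List.slice nums none (some (-1))) ((advantage + PySem.List.pyGetD nums (-1) 0) * -1))
  else if l = "b" then
    if h1 : nums.length = 0 ∧ advantage > 0 then true
    else if h2 : nums.length = 0 ∧ advantage ≤ 0 then false
    else
      !(solution "a" (PySem.List.slice nums (some 1) none) ((advantage + PySem.List.pyGetD nums 0 0) * -1)) ||
      !(solution "a" (PySem.List.slice nums none (some (-1))) ((advantage + PySem.List.pyGetD nums (-1) 0) * -1))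
  else false  -- Python falls off and returns None here; Pre_solution excludes these inputs
termination_by nums.length
decreasing_by
  all_goals simp [PySem.List.slice_from_one, PySem.List.slice_to_neg_one, List.length_dropLast]; omega

-- ===== PORT B =====
-- d after round L holds, for every start index i, the forced score difference of the
-- player to move on the length-L segment nums[i:i+L] (bottom-up interval DP).
def solution_alt (l : String) (nums : List Int) (advantage : Int) : Bool :=
  let n := nums.length
  let d := (List.range (n - 1)).foldl (fun d k =>
      let L := k + 2
      (List.range (n - L + 1)).map (fun i =>
        max (nums.getD i 0 - d.getD (i + 1) 0) (nums.getD (i + L - 1) 0 - d.getD i 0)))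
    nums
  let diff := if n > 0 then d.getD 0 0 else 0
  if l = "a" then advantage + diff ≥ 0
  else if l = "b" then advantage + diff > 0
  else false  -- Python falls off and returns None here; outside Pre_solution

-- ===== PRECONDITION & SPEC =====
-- Pre_ excludes l ∉ {"a","b"}, on which A falls off every branch and returns None (not a bool).
def Pre_solution (l : String) (nums : List Int) (advantage : Int) : Prop := l = "a" ∨ l = "b"
instance (l : String) (nums : List Int) (advantage : Int) : Decidable (Pre_solution l nums advantage) := by unfold Pre_solution; infer_instance
def pvWitness_solution : String × List Int × Int := ("a", [1, 5, 2], 0)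
def Spec_solution (l : String) (nums : List Int) (advantage : Int) (out : Bool) : Prop := out = solution_alt l nums advantage
instance (l : String) (nums : List Int) (advantage : Int) (out : Bool) : Decidable (Spec_solution l nums advantage out) := by unfold Spec_solution; infer_instance

-- ===== CLAIM (what is proved, stated in full; the proofs are below) =====
def Claim_equal_solution : Prop := ∀ (l : String) (nums : List Int) (advantage : Int), Dom_solution l nums advantage → Pre_solution l nums advantage → Spec_solution l nums advantage (solution l nums advantage)

-- ===== LEMMAS AND PROOFS =====

-- The forced score difference of the player to move (specification of the game value).
def Dspec (xs : List Int) : Int :=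
  match xs with
  | [] => 0
  | h :: t => max (h - Dspec t) ((h :: t).getLastD 0 - Dspec (h :: t).dropLast)
termination_by xs.length
decreasing_by all_goals simp [List.length_dropLast]

lemma solution_char : ∀ (n : Nat) (nums : List Int), nums.length = n → ∀ adv : Int,
    solution "a" nums adv = decide (0 ≤ adv + Dspec nums) ∧
    solution "b" nums adv = decide (0 < adv + Dspec nums) := by
  intro n
  induction n using Nat.strong_induction_on with
  | _ n ih =>
    intro nums hlen adv
    match nums with
    | [] =>
      refine ⟨?_, ?_⟩
      · rw [solution]
        rw [if_pos rfl]
        simp only [Dspec]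
        by_cases hc : (0:Int) ≤ adv
        · rw [dif_pos ⟨rfl, hc⟩]
          simp [hc]
        · rw [dif_neg (by rintro ⟨-, hx⟩; omega), dif_pos ⟨rfl, by omega⟩]
          simp; omega
      · rw [solution]
        rw [if_neg (by decide), if_pos rfl]
        simp only [Dspec]
        by_cases hc : adv ≤ (0:Int)
        · rw [dif_neg (by rintro ⟨-, hx⟩; omega), dif_pos ⟨rfl, hc⟩]
          simp; omega
        · rw [dif_pos ⟨rfl, by omega⟩]
          simp; omega
    | h :: t =>
      subst hlen
      have hlt : t.length < (h :: t).length := by simp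
      have hld : (h :: t).dropLast.length < (h :: t).length := by
        simp [List.length_dropLast]
      have ihtail := ih t.length hlt t rfl
      have ihdrop := ih (h :: t).dropLast.length hld (h :: t).dropLast rfl
      have hD : Dspec (h :: t) = max (h - Dspec t) ((h :: t).getLastD 0 - Dspec (h :: t).dropLast) := by
        rw [Dspec]
      have hpg : PySem.List.pyGetD (h :: t) (-1) 0 = (h :: t).getLastD 0 := by
        simp [PySem.List.pyGetD, PySem.List.pyGet?_neg_one, List.getLastD_eq_getLast?]
      constructor
      · rw [solution]
        rw [if_pos rfl]
        rw [dif_neg (by simp), dif_neg (by simp)]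
        simp only [PySem.List.slice_from_one, PySem.List.slice_to_neg_one,
          PySem.List.pyGetD_zero_cons, List.tail_cons, hpg]
        rw [(ihtail _).2, (ihdrop _).2]
        rw [hD, Bool.eq_iff_iff]
        simp only [Bool.or_eq_true, Bool.not_eq_true', decide_eq_false_iff_not, decide_eq_true_eq]
        rcases le_total (h - Dspec t) ((h :: t).getLastD 0 - Dspec (h :: t).dropLast) with hc | hc
        · rw [max_eq_right hc]; omega
        · rw [max_eq_left hc]; omega
      · rw [solution]
        rw [if_neg (by decide), if_pos rfl]
        rw [dif_neg (by simp), dif_neg (by simp)]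
        simp only [PySem.List.slice_from_one, PySem.List.slice_to_neg_one,
          PySem.List.pyGetD_zero_cons, List.tail_cons, hpg]
        rw [(ihtail _).1, (ihdrop _).1]
        rw [hD, Bool.eq_iff_iff]
        simp only [Bool.or_eq_true, Bool.not_eq_true', decide_eq_false_iff_not, decide_eq_true_eq]
        rcases le_total (h - Dspec t) ((h :: t).getLastD 0 - Dspec (h :: t).dropLast) with hc | hc
        · rw [max_eq_right hc]; omega
        · rw [max_eq_left hc]; omega

-- Dspec of a nonempty segment unfolds into the two sub-segments the DP uses.
lemma Dspec_seg (nums : List Int) (i L : Nat) (hi : i + (L + 1) ≤ nums.length) :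
    Dspec ((nums.drop i).take (L + 1)) =
      max (nums.getD i 0 - Dspec ((nums.drop (i + 1)).take L))
          (nums.getD (i + L) 0 - Dspec ((nums.drop i).take L)) := by
  have hilt : i < nums.length := by omega
  have hdrop : nums.drop i = nums[i] :: nums.drop (i + 1) := List.drop_eq_getElem_cons hilt
  have hseg : (nums.drop i).take (L + 1) = nums[i] :: (nums.drop (i + 1)).take L := by
    rw [hdrop]; rfl
  have hlenseg : ((nums.drop i).take (L + 1)).length = L + 1 := by
    simp; omega
  rw [hseg, Dspec, ← hseg]
  -- last element
  have hlast : ((nums.drop i).take (L + 1)).getLastD 0 = nums.getD (i + L) 0 := by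
    rw [List.getLastD_eq_getLast?, List.getLast?_eq_getElem?]
    rw [hlenseg]
    simp only [Nat.add_sub_cancel]
    rw [List.getElem?_take_of_lt (by omega), List.getElem?_drop]
    rw [List.getElem?_eq_getElem (by omega)]
    simp [List.getD, List.getElem?_eq_getElem (show i + L < nums.length by omega)]
  -- dropLast
  have hdl : ((nums.drop i).take (L + 1)).dropLast = (nums.drop i).take L := by
    rw [List.dropLast_eq_take, hlenseg]
    simp [List.take_take]
  have hhead : nums[i] = nums.getD i 0 := by
    simp [List.getD, List.getElem?_eq_getElem hilt]
  rw [hlast, hdl, hhead]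

-- The DP invariant: after the rounds for lengths 2..L+1, row d describes all length-(L+1) segments.
def DPInv (nums : List Int) (L : Nat) (d : List Int) : Prop :=
  d.length = nums.length - L ∧
  ∀ i : Nat, i + (L + 1) ≤ nums.length → d.getD i 0 = Dspec ((nums.drop i).take (L + 1))

lemma dp_invariant (nums : List Int) : ∀ m : Nat, m ≤ nums.length - 1 →
    DPInv nums m ((List.range m).foldl (fun d k =>
      let L := k + 2
      (List.range (nums.length - L + 1)).map (fun i =>
        max (nums.getD i 0 - d.getD (i + 1) 0) (nums.getD (i + L - 1) 0 - d.getD i 0)))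
      nums) := by
  intro m
  induction m with
  | zero =>
    intro _
    refine ⟨by simp, ?_⟩
    intro i hi
    have hilt : i < nums.length := by omega
    have hseg : (nums.drop i).take 1 = [nums[i]] := by
      rw [List.drop_eq_getElem_cons hilt]; rfl
    rw [hseg]
    have : Dspec [nums[i]] = nums[i] := by
      rw [Dspec]; simp [Dspec]
    rw [this]
    simp [List.getD, List.getElem?_eq_getElem hilt]
  | succ m ihm =>
    intro hm
    rw [List.range_succ, List.foldl_append, List.foldl_cons, List.foldl_nil]
    obtain ⟨hlen, hval⟩ := ihm (by omega)
    set dprev := (List.range m).foldl (fun d k =>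
      let L := k + 2
      (List.range (nums.length - L + 1)).map (fun i =>
        max (nums.getD i 0 - d.getD (i + 1) 0) (nums.getD (i + L - 1) 0 - d.getD i 0)))
      nums with hdprev
    refine ⟨by simp; omega, ?_⟩
    intro i hi
    have hw : i < nums.length - (m + 2) + 1 := by omega
    have hget : ((List.range (nums.length - (m + 2) + 1)).map (fun i =>
        max (nums.getD i 0 - dprev.getD (i + 1) 0)
            (nums.getD (i + (m + 2) - 1) 0 - dprev.getD i 0))).getD i 0 =
        max (nums.getD i 0 - dprev.getD (i + 1) 0)
            (nums.getD (i + (m + 2) - 1) 0 - dprev.getD i 0) := by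
      have : i < ((List.range (nums.length - (m + 2) + 1)).map (fun i =>
          max (nums.getD i 0 - dprev.getD (i + 1) 0)
              (nums.getD (i + (m + 2) - 1) 0 - dprev.getD i 0))).length := by
        simp; omega
      rw [List.getD, List.getElem?_eq_getElem this]
      simp
    simp only [hget]
    have h1 := hval (i + 1) (by omega)
    have h2 := hval i (by omega)
    rw [show i + (m + 2) - 1 = i + (m + 1) from by omega, h1, h2,
      Dspec_seg nums i (m + 1) (by omega)]

-- closed form for B
lemma solution_alt_char (l : String) (nums : List Int) (adv : Int) :
    solution_alt l nums adv =
      if l = "a" then decide (0 ≤ adv + Dspec nums)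
      else if l = "b" then decide (0 < adv + Dspec nums)
      else false := by
  unfold solution_alt
  have hinv := dp_invariant nums (nums.length - 1) (le_refl _)
  obtain ⟨hlen, hval⟩ := hinv
  by_cases hn : nums.length = 0
  · have : nums = [] := List.eq_nil_of_length_eq_zero hn
    subst this
    simp [Dspec]
  · have hfin : ((List.range (nums.length - 1)).foldl (fun d k =>
        let L := k + 2
        (List.range (nums.length - L + 1)).map (fun i =>
          max (nums.getD i 0 - d.getD (i + 1) 0) (nums.getD (i + L - 1) 0 - d.getD i 0)))
        nums).getD 0 0 = Dspec nums := by
      have h0 := hval 0 (by omega)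
      rw [h0]
      congr 1
      rw [List.drop_zero]
      rw [show nums.length - 1 + 1 = nums.length from by omega, List.take_length]
    simp only [hfin]
    rw [if_pos (by omega : nums.length > 0)]

-- ===== VERDICT (by name: the statement is the Claim_ definition above) =====
theorem solution_spec : Claim_equal_solution := by
  intro l nums adv _ hpre
  unfold Spec_solution
  rw [solution_alt_char]
  rcases hpre with h | h <;> subst h
  · rw [if_pos rfl]
    exact (solution_char nums.length nums rfl adv).1
  · rw [if_neg (by decide), if_pos rfl]
    exact (solution_char nums.length nums rfl adv).2
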